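-- pv_equiv track=rewrite | github.com/dyi919/algorithm-practice | practice/2023_02/230206_Programmers_StarSequence/230206_Programmers_StarSequence.py | solution
-- ===== SOURCE A (Python) =====
-- from collections import Counter
--
-- def solution(a):
--     N = len(a)
--
--     if N == 1:
--         return 0
--
--     c = Counter(a)
--     answer = -1
--
--     for k, v in c.items():
--         if v * 2 <= answer:
--             continue
--
--         length = 0
--         i = 0
--
--         while i < N - 1:
--             if (a[i] != k and a[i + 1] != k) or (a[i] == a[i + 1]):
--                 i += 1
--                 continue
--
--             length += 2
--             i += 2
--
--         answer = max(length, answer)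
--
--     return answer
-- ===== SOURCE B (Python) =====
-- def solution(a):
--     # One pass over adjacent edges, maintaining per-value greedy state (count, last taken index)
--     st = {}
--     for i in range(len(a) - 1):
--         if a[i] != a[i + 1]:
--             for k in (a[i], a[i + 1]):
--                 c, l = st.get(k, (0, -2))
--                 if i - l >= 2:
--                     st[k] = (c + 2, i)
--     return max((st.get(k, (0, -2))[0] for k in set(a)), default=-1)
-- ===== Notes on version B (the rewrite author's own statement) =====
-- stated objective: alternative
-- what changed: Instead of re-scanning the whole array once per distinct value (with a pruning test), B does a single pass over adjacent unequal pairs, maintaining for each of the pair's two values a greedy state (count, last taken index), then takes the max over the distinct values.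
import Mathlib
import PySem

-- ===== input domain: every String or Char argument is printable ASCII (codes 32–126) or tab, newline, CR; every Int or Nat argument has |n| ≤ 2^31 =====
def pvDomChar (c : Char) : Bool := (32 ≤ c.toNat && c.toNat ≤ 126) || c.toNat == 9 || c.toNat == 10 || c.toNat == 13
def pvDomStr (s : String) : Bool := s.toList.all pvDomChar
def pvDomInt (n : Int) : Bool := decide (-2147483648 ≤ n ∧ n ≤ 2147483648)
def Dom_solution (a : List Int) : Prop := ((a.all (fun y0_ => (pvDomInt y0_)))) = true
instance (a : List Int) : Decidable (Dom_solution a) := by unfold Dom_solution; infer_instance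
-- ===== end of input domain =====

-- B replaces A's per-distinct-value rescans of the whole array by a single pass over adjacent
-- unequal pairs with per-value greedy state (objective: alternative algorithm, same result).

-- ===== PORT A =====
-- the 'while i < N - 1' loop of A, for one key k (state: length, i); the structurally
-- decreasing fuel (≥ N - 1 - i at every call, so the 0-case is never reached) only makes
-- the recursion total
def solnWhile (a : List Int) (k : Int) (N : Nat) : Nat → Int → Nat → Int
  | 0, length, _ => length
  | fuel + 1, length, i =>
    if i < N - 1 then
      if (¬ a.getD i 0 = k ∧ ¬ a.getD (i+1) 0 = k) ∨ a.getD i 0 = a.getD (i+1) 0 then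
        solnWhile a k N fuel length (i+1)
      else
        solnWhile a k N fuel (length + 2) (i+2)
    else length

def solution (a : List Int) : Int :=
  if a.length = 1 then 0
  else
    (PySem.Dict.counter a).items.foldl (fun answer kv =>
      if kv.2 * 2 ≤ answer then answer
      else max (solnWhile a kv.1 a.length a.length 0 0) answer) (-1)

-- ===== PORT B =====
-- body of B's 'for i in range(len(a)-1)' loop: update the greedy state of the pair's two values
def bStep (a : List Int) (st : PySem.Dict Int (Int × Int)) (i : Nat) : PySem.Dict Int (Int × Int) :=
  if ¬ a.getD i 0 = a.getD (i+1) 0 then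
    [a.getD i 0, a.getD (i+1) 0].foldl (fun st k =>
      if (i : Int) - (st.getD k (0, -2)).2 ≥ 2
        then st.insert k ((st.getD k (0, -2)).1 + 2, (i : Int)) else st) st
  else st

def solution_alt (a : List Int) : Int :=
  PySem.List.maxD ((PySem.Set.ofList a).map (fun k =>
    (((List.range (a.length - 1)).foldl (bStep a) PySem.Dict.empty).getD k (0, -2)).1))
    (fun x => x) (-1)

-- ===== PRECONDITION & SPEC =====
def Spec_solution (a : List Int) (out : Int) : Prop := out = solution_alt a
instance (a : List Int) (out : Int) : Decidable (Spec_solution a out) := by unfold Spec_solution; infer_instance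

-- ===== CLAIM (what is proved, stated in full; the proofs are below) =====
def Claim_equal_solution : Prop := ∀ (a : List Int), Dom_solution a → Spec_solution a (solution a)

-- ===== LEMMAS AND PROOFS =====

-- i is an edge usable for value k: adjacent entries differ and one of them is k
def edgeB (a : List Int) (k : Int) (i : Nat) : Bool :=
  decide (¬ a.getD i 0 = a.getD (i+1) 0 ∧ (a.getD i 0 = k ∨ a.getD (i+1) 0 = k))

-- one greedy step of B, on Nat edge index e
def gstep (s : Int × Int) (e : Nat) : Int × Int :=
  if (e : Int) - s.2 ≥ 2 then (s.1 + 2, (e : Int)) else s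

-- greedy pair count (times two) over an increasing edge list, given the last taken index
def gcnt (last : Int) : List Nat → Int
  | [] => 0
  | e :: es => if (e : Int) - last ≥ 2 then 2 + gcnt (e : Int) es else gcnt last es

-- the per-key value both programs compute
def Lk (a : List Int) (k : Int) : Int :=
  gcnt (-2) ((List.range (a.length - 1)).filter (edgeB a k))

theorem gcnt_init (es : List Nat) (l l' : Int)
    (h : ∀ e ∈ es, 2 ≤ (e : Int) - l ∧ 2 ≤ (e : Int) - l') :
    gcnt l es = gcnt l' es := by
  cases es with
  | nil => rfl
  | cons e es =>
    have := h e (by simp)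
    simp [gcnt, this.1, this.2]

theorem solnWhile_eq (a : List Int) (k : Int) (N : Nat) (fuel : Nat) (length : Int)
    (i : Nat) (hf : N - 1 - i ≤ fuel) :
    solnWhile a k N fuel length i
      = length + gcnt ((i : Int) - 2) ((List.range' i (N - 1 - i)).filter (edgeB a k)) := by
  induction fuel generalizing length i with
  | zero =>
    have hz : N - 1 - i = 0 := by omega
    simp [solnWhile, hz, gcnt]
  | succ fuel ih =>
    by_cases hlt : i < N - 1
    · rw [solnWhile, if_pos hlt]
      by_cases hcond : (¬ a.getD i 0 = k ∧ ¬ a.getD (i+1) 0 = k) ∨ a.getD i 0 = a.getD (i+1) 0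
      · rw [if_pos hcond]
        have hE : edgeB a k i = false := by
          simp only [edgeB, decide_eq_false_iff_not]
          tauto
        have hn : N - 1 - i = (N - 1 - (i + 1)) + 1 := by omega
        rw [hn, List.range'_succ, List.filter_cons_of_neg (by simp [hE]), ih length (i+1) (by omega)]
        congr 1
        apply gcnt_init
        intro e he
        have : i + 1 ≤ e := by
          have := List.mem_range'_1.mp (List.mem_of_mem_filter he)
          omega
        constructor <;> push_cast <;> omega
      · rw [if_neg hcond]
        have hE : edgeB a k i = true := by
          simp only [edgeB, decide_eq_true_eq]
          tauto
        have hn : N - 1 - i = (N - 1 - (i + 1)) + 1 := by omega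
        rw [hn, List.range'_succ, List.filter_cons_of_pos hE]
        rw [show gcnt ((i : Int) - 2)
              (i :: List.filter (edgeB a k) (List.range' (i + 1) (N - 1 - (i + 1))))
            = 2 + gcnt (i : Int)
                (List.filter (edgeB a k) (List.range' (i + 1) (N - 1 - (i + 1)))) from by
          simp [gcnt]]
        have key : gcnt (i : Int) (List.filter (edgeB a k) (List.range' (i + 1) (N - 1 - (i + 1))))
            = gcnt (i : Int) (List.filter (edgeB a k) (List.range' (i + 2) (N - 1 - (i + 2)))) := by
          rcases Nat.eq_zero_or_pos (N - 1 - (i + 1)) with hz | hp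
          · have hz2 : N - 1 - (i + 2) = 0 := by omega
            simp [hz, hz2]
          · have hn2 : N - 1 - (i + 1) = (N - 1 - (i + 2)) + 1 := by omega
            rw [hn2, List.range'_succ]
            cases hE2 : edgeB a k (i + 1) with
            | false => rw [List.filter_cons_of_neg (by simp [hE2])]
            | true =>
              rw [List.filter_cons_of_pos hE2]
              simp [gcnt]
        rw [key, ih (length + 2) (i+2) (by omega)]
        have : ((((i + 2 : Nat)) : Int) - 2) = (i : Int) := by push_cast; ring
        rw [this]
        ring
    · rw [solnWhile, if_neg hlt]
      have hz : N - 1 - i = 0 := by omega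
      simp [hz, gcnt]

theorem solnWhile_le (a : List Int) (k : Int) (fuel : Nat) (length : Int) (i : Nat) :
    solnWhile a k a.length fuel length i ≤ length + 2 * (((a.drop i).count k : Int)) := by
  induction fuel generalizing length i with
  | zero =>
    have : (0 : Int) ≤ ((a.drop i).count k : Int) := Int.natCast_nonneg _
    simp only [solnWhile]
    omega
  | succ fuel ih =>
    rw [solnWhile]
    by_cases hlt : i < a.length - 1
    · rw [if_pos hlt]
      by_cases hcond : (¬ a.getD i 0 = k ∧ ¬ a.getD (i+1) 0 = k) ∨ a.getD i 0 = a.getD (i+1) 0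
      · rw [if_pos hcond]
        have hi : i < a.length := by omega
        have hd : a.drop i = a[i] :: a.drop (i + 1) := List.drop_eq_getElem_cons hi
        have hc : (a.drop (i + 1)).count k ≤ (a.drop i).count k := by
          rw [hd, List.count_cons]; omega
        calc solnWhile a k a.length fuel length (i + 1)
            ≤ length + 2 * ((a.drop (i + 1)).count k : Int) := ih length (i+1)
          _ ≤ length + 2 * ((a.drop i).count k : Int) := by
              have := hc; omega
      · rw [if_neg hcond]
        have hi1 : i + 1 < a.length := by omega
        have hi : i < a.length := by omega
        have hd : a.drop i = a[i] :: a[i + 1] :: a.drop (i + 2) := by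
          rw [List.drop_eq_getElem_cons hi, List.drop_eq_getElem_cons hi1]
        have hk : a[i] = k ∨ a[i + 1] = k := by
          rw [List.getD_eq_getElem a 0 hi, List.getD_eq_getElem a 0 hi1] at hcond
          tauto
        have hc : 1 + (a.drop (i + 2)).count k ≤ (a.drop i).count k := by
          rw [hd, List.count_cons, List.count_cons]
          rcases hk with h | h <;> simp [h] <;> omega
        calc solnWhile a k a.length fuel (length + 2) (i + 2)
            ≤ length + 2 + 2 * ((a.drop (i + 2)).count k : Int) := ih (length + 2) (i+2)
          _ ≤ length + 2 * ((a.drop i).count k : Int) := by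
              have := hc; omega
    · rw [if_neg hlt]
      have : (0 : Int) ≤ ((a.drop i).count k : Int) := Int.natCast_nonneg _
      omega

theorem gcnt_nonneg (l : Int) (es : List Nat) : 0 ≤ gcnt l es := by
  induction es generalizing l with
  | nil => simp [gcnt]
  | cons e es ih => simp only [gcnt]; split <;> [linarith [ih (e : Int)]; exact ih l]

theorem getD_upd (st : PySem.Dict Int (Int × Int)) (v k : Int) (m : Nat) :
    (if (m : Int) - (st.getD v (0, -2)).2 ≥ 2
        then st.insert v ((st.getD v (0, -2)).1 + 2, (m : Int)) else st).getD k (0, -2)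
      = if k = v then gstep (st.getD v (0, -2)) m else st.getD k (0, -2) := by
  simp only [gstep]
  by_cases hk : k = v
  · rw [hk]
    by_cases h : (m : Int) - (st.getD v (0, -2)).2 ≥ 2
    · rw [if_pos h, if_pos rfl, PySem.Dict.getD_insert_self, if_pos h]
    · rw [if_neg h, if_pos rfl, if_neg h]
  · by_cases h : (m : Int) - (st.getD v (0, -2)).2 ≥ 2
    · rw [if_pos h, if_neg hk, PySem.Dict.getD_insert, if_neg hk]
    · rw [if_neg h, if_neg hk]

-- B's dict fold, read at key k, is the greedy fold over k's edge list
theorem bFold_getD (a : List Int) (m : Nat) (k : Int) :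
    (((List.range m).foldl (bStep a) PySem.Dict.empty).getD k (0, -2))
      = ((List.range m).filter (edgeB a k)).foldl gstep (0, -2) := by
  induction m with
  | zero => simp [PySem.Dict.getD_empty]
  | succ m ih =>
    rw [List.range_succ, List.foldl_append, List.filter_append, List.foldl_append, ← ih]
    by_cases hv : a.getD m 0 = a.getD (m+1) 0
    · have hE : edgeB a k m = false := by
        simp only [edgeB, decide_eq_false_iff_not]
        exact fun h => h.1 hv
      simp only [List.foldl_cons, List.foldl_nil, bStep]
      rw [if_neg (not_not_intro hv)]
      rw [List.filter_cons, hE, if_neg Bool.false_ne_true, List.filter_nil, List.foldl_nil]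
    · have hv' : ¬ a.getD (m+1) 0 = a.getD m 0 := fun h => hv h.symm
      simp only [List.foldl_cons, List.foldl_nil, bStep]
      rw [if_pos hv]
      by_cases hk2 : k = a.getD (m+1) 0
      · have hE : edgeB a k m = true := by
          simp only [edgeB, decide_eq_true_eq]
          exact ⟨hv, Or.inr hk2.symm⟩
        rw [getD_upd, if_pos hk2, getD_upd, if_neg hv', List.filter_cons, hE, if_pos rfl,
          List.filter_nil, List.foldl_cons, List.foldl_nil, hk2]
      · by_cases hk1 : k = a.getD m 0
        · have hE : edgeB a k m = true := by
            simp only [edgeB, decide_eq_true_eq]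
            exact ⟨hv, Or.inl hk1.symm⟩
          rw [getD_upd, if_neg hk2, getD_upd, if_pos hk1, ← hk1, List.filter_cons, hE,
            if_pos rfl, List.filter_nil, List.foldl_cons, List.foldl_nil]
        · have hE : edgeB a k m = false := by
            simp only [edgeB, decide_eq_false_iff_not]
            rintro ⟨-, h | h⟩
            · exact hk1 h.symm
            · exact hk2 h.symm
          rw [getD_upd, if_neg hk2, getD_upd, if_neg hk1, List.filter_cons, hE,
            if_neg Bool.false_ne_true, List.filter_nil, List.foldl_nil]

theorem gfold (es : List Nat) (c l : Int) :
    (es.foldl gstep (c, l)).1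
      = c + gcnt l es := by
  induction es generalizing c l with
  | nil => simp [gcnt]
  | cons e es ih =>
    simp only [gcnt, List.foldl, gstep]
    split
    · simp [ih]; ring
    · simp [ih]

theorem max?_cons (l : List Int) (m : Int) :
    PySem.List.max? (m :: l) (fun y : Int => y)
      = some (l.foldl (fun acc x => max acc x) m) := by
  induction l generalizing m with
  | nil => rfl
  | cons y l ih =>
    have h1 : PySem.List.max? (m :: y :: l) (fun y : Int => y)
        = PySem.List.max? (max m y :: l) (fun y : Int => y) := by
      simp only [PySem.List.max?, List.foldl_cons]
      congr 1
      rcases lt_or_ge m y with h | h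
      · rw [if_pos h, max_eq_right h.le]
      · rw [if_neg (not_lt.mpr h), max_eq_left h]
    rw [h1, ih, List.foldl_cons]

theorem maxD_map (L : Int → Int) (S : List Int) (h0 : ∀ k ∈ S, 0 ≤ L k) :
    PySem.List.maxD (S.map L) (fun y => y) (-1)
      = S.foldl (fun ans k => max (L k) ans) (-1) := by
  cases S with
  | nil => rfl
  | cons x S =>
    have hx : max (L x) (-1) = L x := max_eq_left (by have := h0 x (by simp); omega)
    simp only [List.map_cons, List.foldl_cons, hx, PySem.List.maxD]
    rw [max?_cons, Option.getD_some, List.foldl_map]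
    have : ∀ (S : List Int) (v : Int),
        S.foldl (fun acc k => max acc (L k)) v = S.foldl (fun ans k => max (L k) ans) v := by
      intro S
      induction S with
      | nil => intro v; rfl
      | cons y S ih =>
        intro v
        rw [List.foldl_cons, List.foldl_cons, max_comm]
        exact ih _
    exact this S (L x)

theorem alt_eq (a : List Int) :
    solution_alt a = (PySem.Set.ofList a).foldl (fun ans k => max (Lk a k) ans) (-1) := by
  unfold solution_alt
  have hf : ∀ k, (((List.range (a.length - 1)).foldl (bStep a) PySem.Dict.empty).getD
      k (0, -2)).1 = Lk a k := by
    intro k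
    rw [bFold_getD, gfold, Lk]
    ring
  rw [show ((PySem.Set.ofList a).map fun k =>
        (((List.range (a.length - 1)).foldl (bStep a) PySem.Dict.empty).getD k (0, -2)).1)
      = (PySem.Set.ofList a).map (Lk a) from List.map_congr_left fun k _ => hf k]
  exact maxD_map (Lk a) _ fun k _ => gcnt_nonneg _ _

theorem solution_eq (a : List Int) (h : a.length ≠ 1) :
    solution a = (PySem.Set.ofList a).foldl (fun ans k => max (Lk a k) ans) (-1) := by
  unfold solution
  rw [if_neg h, PySem.Dict.items_counter, List.foldl_map]
  have hL : ∀ k, solnWhile a k a.length a.length 0 0 = Lk a k := by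
    intro k
    rw [solnWhile_eq a k a.length a.length 0 0 (by omega), Lk, ← List.range_eq_range']
    norm_num
  have hB : ∀ k, Lk a k ≤ (a.count k : Int) * 2 := by
    intro k
    have := solnWhile_le a k a.length 0 0
    rw [hL, List.drop_zero] at this
    omega
  have step : ∀ (S : List Int) (ans : Int),
      S.foldl (fun answer k => if (a.count k : Int) * 2 ≤ answer then answer
        else max (solnWhile a k a.length a.length 0 0) answer) ans
      = S.foldl (fun ans k => max (Lk a k) ans) ans := by
    intro S
    induction S with
    | nil => intro ans; rfl
    | cons k S ih =>
      intro ans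
      simp only [List.foldl_cons]
      by_cases hc : (a.count k : Int) * 2 ≤ ans
      · rw [if_pos hc, show max (Lk a k) ans = ans from max_eq_right (by have := hB k; omega)]
        exact ih ans
      · rw [if_neg hc, hL]
        exact ih _
  exact step _ _

-- ===== VERDICT (by name: the statement is the Claim_ definition above) =====
theorem solution_spec : Claim_equal_solution := by
  intro a _
  unfold Spec_solution
  rw [alt_eq]
  by_cases h : a.length = 1
  · match a, h with
    | [x], _ =>
      have : Lk [x] x = 0 := by simp [Lk, gcnt]
      simp [solution, PySem.Set.ofList, PySem.Set.add, this]
  · exact solution_eq a h
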